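-- pv_equiv track=rewrite | github.com/isi-metaphor/lcc-service | legacy/extractor-2014-01.py | createDStruc
-- ===== SOURCE A (Python) =====
-- from collections import defaultdict
--
-- def createDStruc(superD, subD, inputVars, checkVars):
--     outputstrucs = defaultdict(dict)
--
--     for superd in superD:
--         for superArgs in superD[superd]:
--             includeD = True
--             if checkVars:
--                 if not superArgs[0] in inputVars:
--                     includeD = False
--
--             if includeD and (superd not in outputstrucs or
--                              superArgs[0] not in outputstrucs[superd]):
--                 outputstrucs[superd][superArgs[0]] = []
--
--             for subd in subD:
--                 for subArgs in subD[subd]: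
--                     if len(subArgs) > 1 and superArgs[0] == subArgs[1]:
--                         if checkVars:
--                             if subArgs[0] in inputVars:
--                                 if not includeD:
--                                     if superd not in outputstrucs or \
--                                        superArgs[0] not in outputstrucs[superd]:
--                                         outputstrucs[superd][superArgs[0]] = []
--                                     includeD = True
--                                 outputstrucs[superd][superArgs[0]].append((subd, subArgs[0]))
--                         else:
--                             outputstrucs[superd][superArgs[0]].append((subd, subArgs[0]))
--
--     return outputstrucs
-- ===== SOURCE B (Python) =====
-- def createDStruc(superD, subD, inputVars, checkVars):
--     # Hash-join: index subD by subArgs[1] once, then one lookup per superArgs.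
--     index = {}
--     for subd, argsLists in subD.items():
--         for subArgs in argsLists:
--             if len(subArgs) > 1:
--                 index.setdefault(subArgs[1], []).append((subd, subArgs[0]))
--     ivars = set(inputVars)
--     out = {}
--     for superd, argsLists in superD.items():
--         for superArgs in argsLists:
--             a0 = superArgs[0]
--             matches = index.get(a0, [])
--             if checkVars:
--                 matches = [p for p in matches if p[1] in ivars]
--             if (not checkVars) or a0 in ivars or matches:
--                 out.setdefault(superd, {}).setdefault(a0, []).extend(matches)
--     return out
-- ===== Notes on version B (the rewrite author's own statement) =====
-- stated objective: faster
-- what changed: A rescans the entire subD (nested double loop) once per superArgs, an O(S*T) nested-loop join; B builds a hash index of subD keyed by subArgs[1] in one pass and then does a single dictionary lookup (plus a filter) per superArgs, an O(S+T) hash join.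
import Mathlib
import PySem

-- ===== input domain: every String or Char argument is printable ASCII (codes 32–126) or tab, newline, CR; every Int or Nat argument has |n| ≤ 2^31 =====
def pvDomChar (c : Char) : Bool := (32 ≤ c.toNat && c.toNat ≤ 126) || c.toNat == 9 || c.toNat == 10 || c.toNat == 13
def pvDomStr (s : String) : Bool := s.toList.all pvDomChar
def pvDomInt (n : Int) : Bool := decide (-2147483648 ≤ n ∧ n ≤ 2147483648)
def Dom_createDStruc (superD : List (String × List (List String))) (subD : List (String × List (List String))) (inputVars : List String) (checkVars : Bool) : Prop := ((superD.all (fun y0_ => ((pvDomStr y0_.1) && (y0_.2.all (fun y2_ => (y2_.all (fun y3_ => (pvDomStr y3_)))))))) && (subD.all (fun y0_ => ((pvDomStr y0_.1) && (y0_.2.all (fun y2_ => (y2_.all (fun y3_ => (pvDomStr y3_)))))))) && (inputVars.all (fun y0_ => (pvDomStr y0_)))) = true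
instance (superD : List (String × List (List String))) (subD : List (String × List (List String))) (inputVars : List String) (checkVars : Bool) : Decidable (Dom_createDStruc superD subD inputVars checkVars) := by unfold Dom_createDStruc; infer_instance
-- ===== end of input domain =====

-- B replaces A's quadratic rescans of subD (one full double scan per superArgs) by a hash-join:
-- subD is indexed once by subArgs[1], then each superArgs does one lookup.  Equivalence of the
-- RETURN value is proved for every input on which the Python A returns (Pre_ below).

-- ===== PORT A =====
-- A's dict parameters are read as Python dicts: PySem.Dict.ofList models dict construction
-- from the association list (later duplicate keys overwrite in place).

-- `outputstrucs[superd][superArgs[0]] = []` guarded by `superd not in … or superArgs[0] not in …`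
def pvA_ensure (out : PySem.Dict String (PySem.Dict String (List (String × String))))
    (superd a0 : String) : PySem.Dict String (PySem.Dict String (List (String × String))) :=
  if !(out.contains superd) || !((out.getD superd PySem.Dict.empty).contains a0) then
    out.modify superd PySem.Dict.empty (fun inn => inn.insert a0 [])
  else out

-- `outputstrucs[superd][superArgs[0]].append(m)`; at every reachable call site the entry exists,
-- so modify-with-default is exact there.
def pvA_app (out : PySem.Dict String (PySem.Dict String (List (String × String))))
    (superd a0 : String) (m : String × String) :
    PySem.Dict String (PySem.Dict String (List (String × String))) :=
  out.modify superd PySem.Dict.empty (fun inn => inn.modify a0 [] (· ++ [m]))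

-- body of A's inner double loop over subD, state = (outputstrucs, includeD)
def pvA_subStep (inputVars : List String) (checkVars : Bool) (superd a0 : String)
    (st : (PySem.Dict String (PySem.Dict String (List (String × String)))) × Bool)
    (subd : String) (subArgs : List String) :
    (PySem.Dict String (PySem.Dict String (List (String × String)))) × Bool :=
  if decide (subArgs.length > 1) && (a0 == PySem.List.pyGetD subArgs 1 "") then
    if checkVars then
      if inputVars.contains (PySem.List.pyGetD subArgs 0 "") then
        let st1 := if !st.2 then (pvA_ensure st.1 superd a0, true) else st
        (pvA_app st1.1 superd a0 (subd, PySem.List.pyGetD subArgs 0 ""), st1.2)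
      else st
    else (pvA_app st.1 superd a0 (subd, PySem.List.pyGetD subArgs 0 ""), st.2)
  else st

-- body of A's loop over one superArgs
def pvA_superStep (subItems : List (String × List (List String))) (inputVars : List String)
    (checkVars : Bool) (out : PySem.Dict String (PySem.Dict String (List (String × String))))
    (superd : String) (superArgs : List String) :
    PySem.Dict String (PySem.Dict String (List (String × String))) :=
  let a0 := PySem.List.pyGetD superArgs 0 ""
  let includeD := if checkVars then inputVars.contains a0 else true
  let out1 := if includeD then pvA_ensure out superd a0 else out
  (subItems.foldl (fun st sub =>
    sub.2.foldl (fun st sa => pvA_subStep inputVars checkVars superd a0 st sub.1 sa) st)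
    (out1, includeD)).1

def createDStruc (superD : List (String × List (List String))) (subD : List (String × List (List String))) (inputVars : List String) (checkVars : Bool) : List (String × List (String × List (String × String))) :=
  (((PySem.Dict.ofList superD).items.foldl (fun out sp =>
      sp.2.foldl (fun out sa =>
        pvA_superStep (PySem.Dict.ofList subD).items inputVars checkVars out sp.1 sa) out)
    PySem.Dict.empty).items.map (fun p => (p.1, p.2.items)))

-- ===== PORT B =====
-- index.setdefault(subArgs[1], []).append((subd, subArgs[0]))
def pvB_index (subItems : List (String × List (List String))) :
    PySem.Dict String (List (String × String)) :=
  subItems.foldl (fun idx sub =>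
    sub.2.foldl (fun idx sa =>
      if decide (sa.length > 1) then
        idx.modify (PySem.List.pyGetD sa 1 "") [] (· ++ [(sub.1, PySem.List.pyGetD sa 0 "")])
      else idx) idx) PySem.Dict.empty

-- body of B's loop over one superArgs: one index lookup, one filter, one conditional extend
def pvB_superStep (index : PySem.Dict String (List (String × String))) (ivars : PySem.Set String)
    (checkVars : Bool) (out : PySem.Dict String (PySem.Dict String (List (String × String))))
    (superd : String) (superArgs : List String) :
    PySem.Dict String (PySem.Dict String (List (String × String))) :=
  let a0 := PySem.List.pyGetD superArgs 0 ""
  let ms0 := index.getD a0 []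
  let ms := if checkVars then ms0.filter (fun p => PySem.Set.contains ivars p.2) else ms0
  if !checkVars || PySem.Set.contains ivars a0 || !ms.isEmpty then
    out.modify superd PySem.Dict.empty (fun inn => inn.modify a0 [] (· ++ ms))
  else out

def createDStruc_alt (superD : List (String × List (List String))) (subD : List (String × List (List String))) (inputVars : List String) (checkVars : Bool) : List (String × List (String × List (String × String))) :=
  let index := pvB_index (PySem.Dict.ofList subD).items
  let ivars := PySem.Set.ofList inputVars
  (((PySem.Dict.ofList superD).items.foldl (fun out sp =>
      sp.2.foldl (fun out sa => pvB_superStep index ivars checkVars out sp.1 sa) out)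
    PySem.Dict.empty).items.map (fun p => (p.1, p.2.items)))

-- ===== PRECONDITION & SPEC =====
-- Pre_ excludes exactly the inputs where the Python A raises IndexError: an empty argument list
-- among the values of the dict superD (A evaluates superArgs[0]).  subD needs no condition
-- (subArgs is indexed only under a len(subArgs) > 1 guard).
def Pre_createDStruc (superD : List (String × List (List String))) (subD : List (String × List (List String))) (inputVars : List String) (checkVars : Bool) : Prop :=
  ∀ p ∈ (PySem.Dict.ofList superD).items, ∀ args ∈ p.2, args ≠ []
instance (superD : List (String × List (List String))) (subD : List (String × List (List String))) (inputVars : List String) (checkVars : Bool) : Decidable (Pre_createDStruc superD subD inputVars checkVars) := by unfold Pre_createDStruc; infer_instance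

def pvWitness_createDStruc : (List (String × List (List String))) × (List (String × List (List String))) × List String × Bool :=
  ([("r", [["x"]])], [("s", [["y", "x"]])], ["x", "y"], true)

def Spec_createDStruc (superD : List (String × List (List String))) (subD : List (String × List (List String))) (inputVars : List String) (checkVars : Bool) (out : List (String × List (String × List (String × String)))) : Prop := out = createDStruc_alt superD subD inputVars checkVars
instance (superD : List (String × List (List String))) (subD : List (String × List (List String))) (inputVars : List String) (checkVars : Bool) (out : List (String × List (String × List (String × String)))) : Decidable (Spec_createDStruc superD subD inputVars checkVars out) := by unfold Spec_createDStruc; infer_instance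

-- ===== CLAIM (what is proved, stated in full; the proofs are below) =====
def Claim_equal_createDStruc : Prop := ∀ (superD : List (String × List (List String))) (subD : List (String × List (List String))) (inputVars : List String) (checkVars : Bool), Dom_createDStruc superD subD inputVars checkVars → Pre_createDStruc superD subD inputVars checkVars → Spec_createDStruc superD subD inputVars checkVars (createDStruc superD subD inputVars checkVars)

-- ===== LEMMAS AND PROOFS =====

abbrev OD := PySem.Dict String (PySem.Dict String (List (String × String)))

-- invariant carried through both outer folds: all (outer and inner) key lists are duplicate-free
def pvGood (out : OD) : Prop :=
  out.keys.Nodup ∧ ∀ p ∈ out.items, p.2.keys.Nodup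

theorem pv_good_empty : pvGood PySem.Dict.empty := by
  constructor
  · exact PySem.Dict.nodup_keys_empty
  · intro p hp; simp [PySem.Dict.empty] at hp

theorem pv_foldl_congr_inv {α β : Type} (P : α → Prop) (f g : α → β → α) (l : List β) (init : α)
    (h0 : P init) (h : ∀ a b, P a → f a b = g a b ∧ P (g a b)) :
    l.foldl f init = l.foldl g init ∧ P (l.foldl g init) := by
  induction l generalizing init with
  | nil => exact ⟨rfl, h0⟩
  | cons x t ih =>
    obtain ⟨he, hp⟩ := h init x h0
    rw [List.foldl_cons, List.foldl_cons, he]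
    exact ih _ hp

theorem pv_modify_modify {κ ν : Type} [BEq κ] [LawfulBEq κ] (d : PySem.Dict κ ν) (k : κ)
    (d0 : ν) (f g : ν → ν) :
    (d.modify k d0 f).modify k d0 g = d.modify k d0 (fun v => g (f v)) := by
  simp [PySem.Dict.modify, PySem.Dict.getD_insert_self, PySem.Dict.insert_insert_self]

theorem pv_insert_getD_self {κ ν : Type} [BEq κ] [LawfulBEq κ] (d : PySem.Dict κ ν) (k : κ)
    (dflt : ν) (hnd : d.keys.Nodup) (hc : d.contains k = true) :
    d.insert k (d.getD k dflt) = d := by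
  apply PySem.Dict.ext
  rw [PySem.Dict.items_insert_of_contains d _ hc]
  conv_rhs => rw [← List.map_id d.items]
  refine List.map_congr_left ?_
  intro p hp
  by_cases hpk : (p.1 == k) = true
  · have hk : p.1 = k := beq_iff_eq.mp hpk
    have hmem : (k, p.2) ∈ d.items := by rw [← hk]; exact hp
    have hget := PySem.Dict.get?_of_mem_items d hmem hnd
    have hgd : d.getD k dflt = p.2 := by
      rw [PySem.Dict.getD_eq_get?_getD, hget]; rfl
    rw [if_pos hpk, hgd, ← hk]
    rfl
  · simp [hpk]

theorem pv_getD_nodup (o : OD) (hG : pvGood o) (k : String) :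
    (o.getD k PySem.Dict.empty).keys.Nodup := by
  rw [PySem.Dict.getD_eq_get?_getD]
  cases h : o.get? k with
  | none => exact pv_good_empty.1
  | some v =>
    exact hG.2 (k, v) (PySem.Dict.mem_items_of_get?_eq_some o h)

theorem pv_good_modify (o : OD) (k : String) (f : PySem.Dict String (List (String × String)) → PySem.Dict String (List (String × String)))
    (hG : pvGood o) (hf : ∀ inn, inn.keys.Nodup → (f inn).keys.Nodup) :
    pvGood (o.modify k PySem.Dict.empty f) := by
  constructor
  · simp only [PySem.Dict.modify]
    exact PySem.Dict.nodup_keys_insert _ _ _ hG.1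
  · intro p hp
    simp only [PySem.Dict.modify] at hp
    rw [PySem.Dict.mem_items_insert] at hp
    rcases hp with h | ⟨h, _⟩
    · rw [h]
      exact hf _ (pv_getD_nodup o hG k)
    · exact hG.2 p h

-- out[superd][a0] extended by l in one modify (B's shape; A's append is the singleton case)
def pvAppList (o : OD) (superd a0 : String) (l : List (String × String)) : OD :=
  o.modify superd PySem.Dict.empty (fun inn => inn.modify a0 [] (· ++ l))

theorem pv_appList_appList (o : OD) (superd a0 : String) (l1 l2 : List (String × String)) :
    pvAppList (pvAppList o superd a0 l1) superd a0 l2 = pvAppList o superd a0 (l1 ++ l2) := by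
  unfold pvAppList
  rw [pv_modify_modify]
  congr 1
  funext inn
  rw [pv_modify_modify]
  congr 1
  funext v
  exact List.append_assoc v l1 l2

theorem pv_app_eq_appList (o : OD) (superd a0 : String) (m : String × String) :
    pvA_app o superd a0 m = pvAppList o superd a0 [m] := rfl

theorem pv_ensure_contains_false (o : OD) (superd a0 : String)
    (h : (!o.contains superd || !(o.getD superd PySem.Dict.empty).contains a0) = true) :
    (o.getD superd PySem.Dict.empty).contains a0 = false := by
  rcases Bool.or_eq_true_iff.mp h with h1 | h2
  · rw [PySem.Dict.getD_of_not_contains o _ (Bool.not_eq_true' .. ▸ h1 : o.contains superd = false)]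
    exact PySem.Dict.contains_empty a0
  · exact Bool.not_eq_true' .. ▸ h2

theorem pv_appList_ensure (o : OD) (superd a0 : String) (l : List (String × String)) :
    pvAppList (pvA_ensure o superd a0) superd a0 l = pvAppList o superd a0 l := by
  unfold pvA_ensure
  split_ifs with h
  · have hc := pv_ensure_contains_false o superd a0 h
    unfold pvAppList
    simp only [PySem.Dict.modify, PySem.Dict.getD_insert_self, PySem.Dict.insert_insert_self]
    congr 2
    rw [PySem.Dict.getD_of_not_contains _ _ hc]
  · rfl

theorem pv_ensure_eq_appList_nil (o : OD) (superd a0 : String) (hG : pvGood o) :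
    pvA_ensure o superd a0 = pvAppList o superd a0 [] := by
  unfold pvA_ensure pvAppList
  split_ifs with h
  · have hc := pv_ensure_contains_false o superd a0 h
    simp only [PySem.Dict.modify]
    congr 2
    rw [PySem.Dict.getD_of_not_contains _ _ hc, List.append_nil]
  · simp at h
    obtain ⟨h1, h2⟩ := h
    simp only [PySem.Dict.modify]
    rw [List.append_nil, pv_insert_getD_self _ _ _ (pv_getD_nodup o hG superd) h2,
      pv_insert_getD_self _ _ _ hG.1 h1]

-- subD flattened to keyed (subd, subArgs) pairs in A's scan order
def pvPairs (subItems : List (String × List (List String))) : List (String × List String) :=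
  subItems.flatMap (fun sub => sub.2.map (fun sa => (sub.1, sa)))

def pvVal (m : String × List String) : String × String := (m.1, PySem.List.pyGetD m.2 0 "")

-- the join partners of a0, in A's scan order
def pvMatches (subItems : List (String × List (List String))) (a0 : String) : List (String × String) :=
  ((pvPairs subItems).filter
    (fun m => (PySem.List.pyGetD m.2 1 "" == a0) && decide (m.2.length > 1))).map pvVal

theorem pv_beq_comm (a b : String) : (a == b) = (b == a) := by
  by_cases h : a = b
  · rw [h]
  · rw [beq_eq_false_iff_ne.mpr h, beq_eq_false_iff_ne.mpr (Ne.symm h)]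

theorem pv_set_contains (l : List String) (x : String) :
    PySem.Set.contains (PySem.Set.ofList l) x = l.contains x := by
  rw [Bool.eq_iff_iff]
  constructor
  · intro h
    exact List.contains_iff_mem.mpr ((PySem.Set.mem_ofList l x).mp (List.contains_iff_mem.mp h))
  · intro h
    exact List.contains_iff_mem.mpr ((PySem.Set.mem_ofList l x).mpr (List.contains_iff_mem.mp h))

theorem pv_index_fold_getD (a0 : String) (P : List (String × List String)) :
    ∀ (d : PySem.Dict String (List (String × String))),
      (P.foldl (fun idx m =>
          if decide (m.2.length > 1) then
            idx.modify (PySem.List.pyGetD m.2 1 "") [] (· ++ [pvVal m])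
          else idx) d).getD a0 []
        = d.getD a0 [] ++
            (P.filter (fun m => (PySem.List.pyGetD m.2 1 "" == a0) && decide (m.2.length > 1))).map pvVal := by
  induction P with
  | nil => intro d; simp
  | cons m t ih =>
    intro d
    rw [List.foldl_cons, List.filter_cons]
    by_cases hlen : (decide (m.2.length > 1)) = true
    · rw [if_pos hlen]
      by_cases hk : (PySem.List.pyGetD m.2 1 "" == a0) = true
      · rw [if_pos (by simp [hk, hlen])]
        have hke : PySem.List.pyGetD m.2 1 "" = a0 := beq_iff_eq.mp hk
        rw [ih, hke, PySem.Dict.getD_modify, if_pos rfl]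
        simp
      · rw [if_neg (by simp [hk]), ih, PySem.Dict.getD_modify,
          if_neg (fun hh => hk (by rw [← hh]; exact beq_self_eq_true a0))]
    · rw [if_neg hlen, if_neg (by simp [hlen]), ih]

theorem pv_stepA_flat (inputVars : List String) (checkVars : Bool) (superd a0 : String)
    (subItems : List (String × List (List String))) (st0 : OD × Bool) :
    subItems.foldl (fun st sub =>
        sub.2.foldl (fun st sa => pvA_subStep inputVars checkVars superd a0 st sub.1 sa) st) st0
      = (pvPairs subItems).foldl
          (fun st m => pvA_subStep inputVars checkVars superd a0 st m.1 m.2) st0 := by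
  unfold pvPairs
  rw [List.foldl_flatMap]
  refine PySem.List.foldl_congr_mem _ _ _ _ ?_
  intro acc sub _
  rw [List.foldl_map]

theorem pv_index_getD (subItems : List (String × List (List String))) (a0 : String) :
    (pvB_index subItems).getD a0 [] = pvMatches subItems a0 := by
  have hflat : pvB_index subItems
      = (pvPairs subItems).foldl (fun idx m =>
          if decide (m.2.length > 1) then
            idx.modify (PySem.List.pyGetD m.2 1 "") [] (· ++ [pvVal m])
          else idx) PySem.Dict.empty := by
    unfold pvB_index pvPairs
    rw [List.foldl_flatMap]
    refine PySem.List.foldl_congr_mem _ _ _ _ ?_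
    intro acc sub _
    rw [List.foldl_map]
    rfl
  rw [hflat, pv_index_fold_getD]
  simp [pvMatches, PySem.Dict.getD_empty]

-- uniform shape of A's inner-loop body on a joinable pair
def pvStepM (superd a0 : String) (st : OD × Bool) (m : String × String) : OD × Bool :=
  if st.2 then (pvA_app st.1 superd a0 m, true)
  else (pvA_app (pvA_ensure st.1 superd a0) superd a0 m, true)

theorem pv_subfold_true (inputVars : List String) (superd a0 : String)
    (P : List (String × List String)) :
    ∀ (st : OD × Bool),
      P.foldl (fun st m => pvA_subStep inputVars true superd a0 st m.1 m.2) st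
        = (((P.filter (fun m => (PySem.List.pyGetD m.2 1 "" == a0) && decide (m.2.length > 1))).filter
              (fun m => inputVars.contains (pvVal m).2)).map pvVal).foldl (pvStepM superd a0) st := by
  induction P with
  | nil => intro st; rfl
  | cons m t ih =>
    intro st
    rw [List.foldl_cons, List.filter_cons]
    by_cases h1 : ((PySem.List.pyGetD m.2 1 "" == a0) && decide (m.2.length > 1)) = true
    · rw [if_pos h1, List.filter_cons]
      have hg : (decide (m.2.length > 1) && (a0 == PySem.List.pyGetD m.2 1 "")) = true := by
        rw [Bool.and_eq_true] at h1
        rw [Bool.and_eq_true]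
        exact ⟨h1.2, by rw [pv_beq_comm]; exact h1.1⟩
      by_cases h2 : (inputVars.contains (pvVal m).2) = true
      · rw [if_pos h2, List.map_cons, List.foldl_cons]
        have hstep : pvA_subStep inputVars true superd a0 st m.1 m.2 = pvStepM superd a0 st (pvVal m) := by
          obtain ⟨o, b⟩ := st
          have h2' : inputVars.contains (PySem.List.pyGetD m.2 0 "") = true := h2
          have h2m : PySem.List.pyGetD m.2 0 "" ∈ inputVars := List.contains_iff_mem.mp h2'
          cases b <;> simp [pvA_subStep, pvStepM, hg, h2m, pvVal]
        rw [hstep]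
        exact ih _
      · rw [if_neg h2]
        have hstep : pvA_subStep inputVars true superd a0 st m.1 m.2 = st := by
          have h2' : inputVars.contains (PySem.List.pyGetD m.2 0 "") = false := by
            simpa using h2
          have h2t : inputVars.contains (PySem.List.pyGetD m.2 0 "") ≠ true := by
            rw [h2']
            exact Bool.false_ne_true
          have h2m : PySem.List.pyGetD m.2 0 "" ∉ inputVars := fun hm =>
            h2t (List.contains_iff_mem.mpr hm)
          simp [pvA_subStep, hg, h2m]
        rw [hstep]
        exact ih _
    · rw [if_neg h1]
      have hg : (decide (m.2.length > 1) && (a0 == PySem.List.pyGetD m.2 1 "")) = false := by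
        rw [Bool.and_comm, pv_beq_comm]
        exact Bool.eq_false_iff.mpr h1
      have hstep : pvA_subStep inputVars true superd a0 st m.1 m.2 = st := by
        simp [pvA_subStep, hg]
      rw [hstep]
      exact ih _

theorem pv_subfold_false (inputVars : List String) (superd a0 : String)
    (P : List (String × List String)) :
    ∀ (o : OD),
      P.foldl (fun st m => pvA_subStep inputVars false superd a0 st m.1 m.2) (o, true)
        = ((P.filter (fun m => (PySem.List.pyGetD m.2 1 "" == a0) && decide (m.2.length > 1))).map
            pvVal).foldl (pvStepM superd a0) (o, true) := by
  induction P with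
  | nil => intro o; rfl
  | cons m t ih =>
    intro o
    rw [List.foldl_cons, List.filter_cons]
    by_cases h1 : ((PySem.List.pyGetD m.2 1 "" == a0) && decide (m.2.length > 1)) = true
    · rw [if_pos h1, List.map_cons, List.foldl_cons]
      have hg : (decide (m.2.length > 1) && (a0 == PySem.List.pyGetD m.2 1 "")) = true := by
        rw [Bool.and_eq_true] at h1
        rw [Bool.and_eq_true]
        exact ⟨h1.2, by rw [pv_beq_comm]; exact h1.1⟩
      have hstep : pvA_subStep inputVars false superd a0 (o, true) m.1 m.2
          = pvStepM superd a0 (o, true) (pvVal m) := by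
        simp [pvA_subStep, pvStepM, hg, pvVal]
      rw [hstep]
      have : pvStepM superd a0 (o, true) (pvVal m) = (pvA_app o superd a0 (pvVal m), true) := by
        simp [pvStepM]
      rw [this]
      exact ih _
    · rw [if_neg h1]
      have hg : (decide (m.2.length > 1) && (a0 == PySem.List.pyGetD m.2 1 "")) = false := by
        rw [Bool.and_comm, pv_beq_comm]
        exact Bool.eq_false_iff.mpr h1
      have hstep : pvA_subStep inputVars false superd a0 (o, true) m.1 m.2 = (o, true) := by
        simp [pvA_subStep, hg]
      rw [hstep]
      exact ih _

theorem pv_foldl_app (superd a0 : String) (l : List (String × String)) :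
    ∀ (o : OD) (l0 : List (String × String)),
      l.foldl (fun o m => pvA_app o superd a0 m) (pvAppList o superd a0 l0)
        = pvAppList o superd a0 (l0 ++ l) := by
  induction l with
  | nil => intro o l0; rw [List.foldl_nil, List.append_nil]
  | cons m t ih =>
    intro o l0
    rw [List.foldl_cons, pv_app_eq_appList, pv_appList_appList, ih, List.append_assoc]
    rfl

theorem pv_stepM_of_true (superd a0 : String) (l : List (String × String)) :
    ∀ (x : OD), l.foldl (pvStepM superd a0) (x, true)
      = (l.foldl (fun o m => pvA_app o superd a0 m) x, true) := by
  induction l with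
  | nil => intro x; rfl
  | cons m t ih =>
    intro x
    rw [List.foldl_cons, List.foldl_cons]
    have : pvStepM superd a0 (x, true) m = (pvA_app x superd a0 m, true) := by simp [pvStepM]
    rw [this]
    exact ih _

theorem pv_stepM_from_ensure (superd a0 : String) (o : OD) (hG : pvGood o)
    (ms : List (String × String)) :
    ms.foldl (pvStepM superd a0) (pvA_ensure o superd a0, true) = (pvAppList o superd a0 ms, true) := by
  rw [pv_stepM_of_true]
  cases ms with
  | nil => rw [List.foldl_nil, pv_ensure_eq_appList_nil o superd a0 hG]
  | cons m t =>
    rw [List.foldl_cons, pv_app_eq_appList, pv_appList_ensure, pv_foldl_app]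
    rfl

theorem pv_stepM_from_false (superd a0 : String) (o : OD) (ms : List (String × String)) :
    ms.foldl (pvStepM superd a0) (o, false)
      = if ms.isEmpty then (o, false) else (pvAppList o superd a0 ms, true) := by
  cases ms with
  | nil => rfl
  | cons m t =>
    rw [List.foldl_cons]
    have h : pvStepM superd a0 (o, false) m = (pvAppList o superd a0 [m], true) := by
      simp [pvStepM, pv_app_eq_appList, pv_appList_ensure]
    simp only [List.isEmpty_cons, Bool.false_eq_true, if_false]
    rw [h, pv_stepM_of_true, pv_foldl_app]
    rfl

theorem pv_good_appList (out : OD) (superd a0 : String) (ms : List (String × String))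
    (hG : pvGood out) : pvGood (pvAppList out superd a0 ms) := by
  refine pv_good_modify out superd _ hG ?_
  intro inn hnd
  simp only [PySem.Dict.modify]
  exact PySem.Dict.nodup_keys_insert _ _ _ hnd

-- the list both programs extend out[superd][a0] with, for one superArgs
def pvMs (subItems : List (String × List (List String))) (inputVars : List String)
    (checkVars : Bool) (a0 : String) : List (String × String) :=
  if checkVars then (pvMatches subItems a0).filter (fun p => inputVars.contains p.2)
  else pvMatches subItems a0

theorem pv_stepB_eval (subItems : List (String × List (List String))) (inputVars : List String)
    (checkVars : Bool) (out : OD) (superd : String) (superArgs : List String) :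
    pvB_superStep (pvB_index subItems) (PySem.Set.ofList inputVars) checkVars out superd superArgs
      = (if (!checkVars || inputVars.contains (PySem.List.pyGetD superArgs 0 "") ||
              !(pvMs subItems inputVars checkVars (PySem.List.pyGetD superArgs 0 "")).isEmpty)
         then pvAppList out superd (PySem.List.pyGetD superArgs 0 "")
                (pvMs subItems inputVars checkVars (PySem.List.pyGetD superArgs 0 ""))
         else out) := by
  simp only [pvB_superStep, pv_index_getD, pv_set_contains, pvMs, pvAppList]

theorem pv_stepA_eval (subItems : List (String × List (List String))) (inputVars : List String)
    (checkVars : Bool) (out : OD) (superd : String) (superArgs : List String) (hG : pvGood out) :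
    pvA_superStep subItems inputVars checkVars out superd superArgs
      = (if (!checkVars || inputVars.contains (PySem.List.pyGetD superArgs 0 "") ||
              !(pvMs subItems inputVars checkVars (PySem.List.pyGetD superArgs 0 "")).isEmpty)
         then pvAppList out superd (PySem.List.pyGetD superArgs 0 "")
                (pvMs subItems inputVars checkVars (PySem.List.pyGetD superArgs 0 ""))
         else out) := by
  cases checkVars with
  | false =>
    simp only [pvA_superStep, pvMs, Bool.false_eq_true, if_false, if_true, Bool.not_false,
      Bool.true_or]
    rw [pv_stepA_flat, pv_subfold_false, pv_stepM_from_ensure _ _ _ hG]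
    rfl
  | true =>
    simp only [pvA_superStep, pvMs, if_true, Bool.not_true, Bool.false_or]
    rw [pv_stepA_flat, pv_subfold_true]
    have hmap : ((((pvPairs subItems).filter
          (fun m => (PySem.List.pyGetD m.2 1 "" == PySem.List.pyGetD superArgs 0 "") &&
            decide (m.2.length > 1))).filter
            (fun m => inputVars.contains (pvVal m).2)).map pvVal)
        = (pvMatches subItems (PySem.List.pyGetD superArgs 0 "")).filter
            (fun p => inputVars.contains p.2) := by
      unfold pvMatches
      rw [List.filter_map]
      rfl
    rw [hmap]
    by_cases hin : inputVars.contains (PySem.List.pyGetD superArgs 0 "") = true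
    · rw [hin, if_pos rfl, pv_stepM_from_ensure _ _ _ hG]
      rfl
    · have hin' : inputVars.contains (PySem.List.pyGetD superArgs 0 "") = false := by
        simpa using hin
      rw [hin', if_neg (Bool.false_ne_true), pv_stepM_from_false]
      by_cases hE : ((pvMatches subItems (PySem.List.pyGetD superArgs 0 "")).filter
          (fun p => inputVars.contains p.2)).isEmpty = true
      · rw [if_pos hE, if_neg (by rw [hE]; exact Bool.false_ne_true)]
      · have hE' : ((pvMatches subItems (PySem.List.pyGetD superArgs 0 "")).filter
            (fun p => inputVars.contains p.2)).isEmpty = false := by simpa using hE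
        rw [if_neg (by rw [hE']; exact Bool.false_ne_true), if_pos (by rw [hE']; rfl)]

theorem pv_step_eq (subItems : List (String × List (List String))) (inputVars : List String)
    (checkVars : Bool) (out : OD) (superd : String) (superArgs : List String) (hG : pvGood out) :
    pvA_superStep subItems inputVars checkVars out superd superArgs
      = pvB_superStep (pvB_index subItems) (PySem.Set.ofList inputVars) checkVars out superd superArgs
    ∧ pvGood (pvB_superStep (pvB_index subItems) (PySem.Set.ofList inputVars) checkVars out superd
        superArgs) := by
  rw [pv_stepA_eval subItems inputVars checkVars out superd superArgs hG,
    pv_stepB_eval subItems inputVars checkVars out superd superArgs]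
  refine ⟨rfl, ?_⟩
  split_ifs
  · exact pv_good_appList out _ _ _ hG
  · exact hG

-- ===== VERDICT =====
theorem createDStruc_spec : Claim_equal_createDStruc := by
  intro superD subD inputVars checkVars _ _
  unfold Spec_createDStruc createDStruc createDStruc_alt
  have h := pv_foldl_congr_inv pvGood
    (fun out sp => sp.2.foldl (fun out sa =>
      pvA_superStep (PySem.Dict.ofList subD).items inputVars checkVars out sp.1 sa) out)
    (fun out sp => sp.2.foldl (fun out sa =>
      pvB_superStep (pvB_index (PySem.Dict.ofList subD).items) (PySem.Set.ofList inputVars)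
        checkVars out sp.1 sa) out)
    (PySem.Dict.ofList superD).items PySem.Dict.empty pv_good_empty ?_
  · rw [h.1]
  · intro out sp hGout
    exact pv_foldl_congr_inv pvGood _ _ sp.2 out hGout
      (fun o sa hGo => pv_step_eq (PySem.Dict.ofList subD).items inputVars checkVars o sp.1 sa hGo)
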